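-- pv_equiv track=rewrite | github.com/dmlc/gluon-cv | gluoncv/torch/utils/coot_utils.py | expand_segment
-- ===== SOURCE A (Python) =====
-- def expand_segment(num_frames, num_target_frames, start_frame, stop_frame):
--     """ expand the segment"""
--     num_frames_seg = stop_frame - start_frame + 1
--     changes = False
--     if num_target_frames > num_frames:
--         num_target_frames = num_frames
--     if num_frames_seg < num_target_frames:
--         while True:
--             if start_frame > 0:
--                 start_frame -= 1
--                 num_frames_seg += 1
--                 changes = True
--             if num_frames_seg == num_target_frames:
--                 break
--             if stop_frame < num_frames - 1:
--                 stop_frame += 1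
--                 num_frames_seg += 1
--                 changes = True
--             if num_frames_seg == num_target_frames:
--                 break
--     return start_frame, stop_frame, changes
-- ===== SOURCE B (Python) =====
-- def expand_segment(num_frames, num_target_frames, start_frame, stop_frame):
--     """Closed-form symmetric expansion: split the missing length across the
--     left/right room arithmetically (left gets the ceiling half, matching the
--     left-first alternation) instead of growing one frame at a time."""
--     target = min(num_target_frames, num_frames)
--     delta = target - (stop_frame - start_frame + 1)
--     if delta <= 0:
--         return start_frame, stop_frame, False
--     left_room = max(start_frame, 0)
--     right_room = max(num_frames - 1 - stop_frame, 0)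
--     left_half = (delta + 1) // 2
--     if left_room < left_half:
--         take_left = left_room
--         take_right = delta - left_room
--     elif right_room < delta - left_half:
--         take_left = delta - right_room
--         take_right = right_room
--     else:
--         take_left = left_half
--         take_right = delta - left_half
--     return start_frame - take_left, stop_frame + take_right, True
-- ===== Notes on version B (the rewrite author's own statement) =====
-- stated objective: faster
-- what changed: Replaces the frame-by-frame alternating while-loop with a closed-form O(1) arithmetic split of the missing length across the left/right room (left side gets the ceiling half, matching the loop's left-first alternation).
import Mathlib
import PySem

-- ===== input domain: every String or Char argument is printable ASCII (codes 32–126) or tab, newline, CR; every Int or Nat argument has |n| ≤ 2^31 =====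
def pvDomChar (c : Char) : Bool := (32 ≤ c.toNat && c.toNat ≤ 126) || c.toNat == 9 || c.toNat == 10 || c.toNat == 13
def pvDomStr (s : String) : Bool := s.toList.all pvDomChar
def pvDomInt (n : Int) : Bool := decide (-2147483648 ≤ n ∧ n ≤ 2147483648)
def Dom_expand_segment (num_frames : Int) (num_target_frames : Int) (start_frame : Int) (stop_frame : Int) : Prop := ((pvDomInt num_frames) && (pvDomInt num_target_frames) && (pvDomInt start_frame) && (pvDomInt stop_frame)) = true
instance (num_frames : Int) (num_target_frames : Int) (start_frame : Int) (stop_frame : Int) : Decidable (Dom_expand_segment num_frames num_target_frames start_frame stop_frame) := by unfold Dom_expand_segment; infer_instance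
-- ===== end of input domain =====

-- B replaces A's frame-by-frame alternating while-loop by a closed-form O(1) arithmetic
-- split of the missing length across the left/right room (left gets the ceiling half,
-- matching the left-first alternation); return values only, no side effects involved.

-- ===== PORT A =====
-- the while-loop of A; fuel bounds the iterations (each productive iteration grows the
-- segment by ≥ 1; inside Pre_ the initial fuel (t - seg).toNat is never exhausted)
def expandLoop (num_frames t : Int) : Nat → Int × Int × Int × Bool → Int × Int × Bool
  | 0, (s, e, _, ch) => (s, e, ch)
  | fuel + 1, (s, e, seg, ch) =>
    let st1 : Int × Int × Bool := if s > 0 then (s - 1, seg + 1, true) else (s, seg, ch)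
    let s1 := st1.1; let seg1 := st1.2.1; let ch1 := st1.2.2
    if seg1 = t then (s1, e, ch1)
    else
      let st2 : Int × Int × Bool := if e < num_frames - 1 then (e + 1, seg1 + 1, true) else (e, seg1, ch1)
      let e2 := st2.1; let seg2 := st2.2.1; let ch2 := st2.2.2
      if seg2 = t then (s1, e2, ch2)
      else expandLoop num_frames t fuel (s1, e2, seg2, ch2)

def expand_segment (num_frames : Int) (num_target_frames : Int) (start_frame : Int) (stop_frame : Int) : Int × Int × Bool :=
  let num_frames_seg := stop_frame - start_frame + 1
  let changes := false
  let t := if num_target_frames > num_frames then num_frames else num_target_frames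
  if num_frames_seg < t then
    expandLoop num_frames t (t - num_frames_seg).toNat (start_frame, stop_frame, num_frames_seg, changes)
  else (start_frame, stop_frame, changes)

-- ===== PORT B =====
def expand_segment_alt (num_frames : Int) (num_target_frames : Int) (start_frame : Int) (stop_frame : Int) : Int × Int × Bool :=
  let target := min num_target_frames num_frames
  let delta := target - (stop_frame - start_frame + 1)
  if delta ≤ 0 then (start_frame, stop_frame, false)
  else
    let left_room := max start_frame 0
    let right_room := max (num_frames - 1 - stop_frame) 0
    let left_half := PySem.Int.floordiv (delta + 1) 2
    if left_room < left_half then (start_frame - left_room, stop_frame + (delta - left_room), true)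
    else if right_room < delta - left_half then (start_frame - (delta - right_room), stop_frame + right_room, true)
    else (start_frame - left_half, stop_frame + (delta - left_half), true)

-- ===== PRECONDITION & SPEC =====
def Spec_expand_segment (num_frames : Int) (num_target_frames : Int) (start_frame : Int) (stop_frame : Int) (out : Int × Int × Bool) : Prop := out = expand_segment_alt num_frames num_target_frames start_frame stop_frame
instance (num_frames : Int) (num_target_frames : Int) (start_frame : Int) (stop_frame : Int) (out : Int × Int × Bool) : Decidable (Spec_expand_segment num_frames num_target_frames start_frame stop_frame out) := by unfold Spec_expand_segment; infer_instance

-- ===== CLAIM (what is proved, stated in full; the proofs are below) =====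
def Claim_equal_expand_segment : Prop := ∀ (num_frames : Int) (num_target_frames : Int) (start_frame : Int) (stop_frame : Int), Dom_expand_segment num_frames num_target_frames start_frame stop_frame → Spec_expand_segment num_frames num_target_frames start_frame stop_frame (expand_segment num_frames num_target_frames start_frame stop_frame)

-- ===== LEMMAS AND PROOFS =====

-- the closed form, phrased with Int.ediv (= floordiv on the nonnegative delta)
def closedF (nf t s e : Int) : Int × Int × Bool :=
  if max s 0 < (t - (e - s + 1) + 1) / 2 then
    (s - max s 0, e + (t - (e - s + 1) - max s 0), true)
  else if max (nf - 1 - e) 0 < t - (e - s + 1) - (t - (e - s + 1) + 1) / 2 then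
    (s - (t - (e - s + 1) - max (nf - 1 - e) 0), e + max (nf - 1 - e) 0, true)
  else
    (s - (t - (e - s + 1) + 1) / 2, e + (t - (e - s + 1) - (t - (e - s + 1) + 1) / 2), true)

lemma closedF_term_left (nf t s e : Int) (hs : 0 < s) (hd : e - s + 1 + 1 = t) :
    (s - 1, e, true) = closedF nf t s e := by
  simp only [closedF]
  split_ifs <;> simp only [Prod.mk.injEq, and_true, true_and] <;> first | trivial | (refine ⟨by omega, by omega, rfl⟩) | omega

lemma closedF_term_both (nf t s e : Int) (hs : 0 < s) (he : e < nf - 1)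
    (hd : e - s + 1 + 2 = t) : (s - 1, e + 1, true) = closedF nf t s e := by
  simp only [closedF]
  split_ifs <;> simp only [Prod.mk.injEq, and_true, true_and] <;> first | trivial | (refine ⟨by omega, by omega, rfl⟩) | omega

lemma closedF_term_right (nf t s e : Int) (hs : s ≤ 0) (he : e < nf - 1)
    (hd : e - s + 1 + 1 = t) : (s, e + 1, true) = closedF nf t s e := by
  simp only [closedF]
  split_ifs <;> simp only [Prod.mk.injEq, and_true, true_and] <;> first | trivial | (refine ⟨by omega, by omega, rfl⟩) | omega

lemma closedF_step_both (nf t s e : Int) (hs : 0 < s) (he : e < nf - 1)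
    (hd : e - s + 1 + 2 < t) (hroom : t ≤ e - s + 1 + max s 0 + max (nf - 1 - e) 0) : closedF nf t (s - 1) (e + 1) = closedF nf t s e := by
  simp only [closedF]
  split_ifs <;> simp only [Prod.mk.injEq, and_true, true_and] <;> first | trivial | (refine ⟨by omega, by omega, rfl⟩) | omega

lemma closedF_step_left (nf t s e : Int) (hs : 0 < s) (he : ¬ e < nf - 1)
    (hd : e - s + 1 + 1 < t) (hroom : t ≤ e - s + 1 + max s 0 + max (nf - 1 - e) 0) : closedF nf t (s - 1) e = closedF nf t s e := by
  have h1 : max (s - 1) 0 = s - 1 := by omega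
  have h2 : max s 0 = s := by omega
  have h3 : max (nf - 1 - e) 0 = 0 := by omega
  simp only [closedF, h1, h2, h3]
  split_ifs <;> simp only [Prod.mk.injEq, and_true, true_and] <;> first | trivial | (refine ⟨by omega, by omega, rfl⟩) | omega

lemma closedF_step_right (nf t s e : Int) (hs : s ≤ 0) (he : e < nf - 1)
    (hd : e - s + 1 + 1 < t) (hroom : t ≤ e - s + 1 + max s 0 + max (nf - 1 - e) 0) : closedF nf t s (e + 1) = closedF nf t s e := by
  have h1 : max s 0 = 0 := by omega
  have h2 : max (nf - 1 - (e + 1)) 0 = nf - 2 - e := by omega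
  have h3 : max (nf - 1 - e) 0 = nf - 1 - e := by omega
  simp only [closedF, h1, h2, h3]
  split_ifs <;> simp only [Prod.mk.injEq, and_true, true_and] <;> first | trivial | (refine ⟨by omega, by omega, rfl⟩) | omega

lemma loop_eq (nf t : Int) (fuel : Nat) :
    ∀ (s e : Int) (ch : Bool),
    e - s + 1 < t →
    t ≤ e - s + 1 + max s 0 + max (nf - 1 - e) 0 →
    t - (e - s + 1) ≤ (fuel : Int) →
    expandLoop nf t fuel (s, e, e - s + 1, ch) = closedF nf t s e := by
  induction fuel with
  | zero =>
    intro s e ch hlt _ hfuel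
    exfalso; simp at hfuel; omega
  | succ fuel ih =>
    intro s e ch hlt hroom hfuel
    rw [expandLoop]
    by_cases hs : s > 0
    · simp only [hs, if_true]
      by_cases hb1 : e - s + 1 + 1 = t
      · simp only [hb1, if_true]
        exact closedF_term_left nf t s e hs hb1
      · simp only [hb1, if_false]
        by_cases he : e < nf - 1
        · simp only [he, if_true]
          by_cases hb2 : e - s + 1 + 1 + 1 = t
          · simp only [hb2, if_true]
            exact closedF_term_both nf t s e hs he (by omega)
          · simp only [hb2, if_false]
            have hseg : e - s + 1 + 1 + 1 = (e + 1) - (s - 1) + 1 := by ring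
            rw [hseg, ih (s - 1) (e + 1) true (by omega) (by omega) (by omega)]
            exact closedF_step_both nf t s e hs he (by omega) hroom
        · simp only [he, if_false, hb1, if_false]
          have hseg : e - s + 1 + 1 = e - (s - 1) + 1 := by ring
          rw [hseg, ih (s - 1) e true (by omega) (by omega) (by omega)]
          exact closedF_step_left nf t s e hs he (by omega) hroom
    · simp only [hs, if_false]
      have hb1 : ¬ (e - s + 1 = t) := by omega
      simp only [hb1, if_false]
      have he : e < nf - 1 := by omega
      simp only [he, if_true]
      by_cases hb2 : e - s + 1 + 1 = t
      · simp only [hb2, if_true]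
        exact closedF_term_right nf t s e (by omega) he hb2
      · simp only [hb2, if_false]
        have hseg : e - s + 1 + 1 = (e + 1) - s + 1 := by ring
        rw [hseg, ih s (e + 1) true (by omega) (by omega) (by omega)]
        exact closedF_step_right nf t s e (by omega) he (by omega) hroom

lemma alt_eq_closedF (nf nt s e : Int) (hd : 0 < min nt nf - (e - s + 1)) :
    expand_segment_alt nf nt s e = closedF nf (min nt nf) s e := by
  simp only [expand_segment_alt, closedF,
    PySem.Int.floordiv_eq_ediv_of_pos (a := min nt nf - (e - s + 1) + 1) (by omega : (0:Int) < 2)]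
  rw [if_neg (by omega)]

-- ===== VERDICT (by name: the statement is the Claim_ definition above) =====
theorem expand_segment_spec : Claim_equal_expand_segment := by
  intro nf nt s e _
  unfold Spec_expand_segment
  unfold expand_segment
  have ht : (if nt > nf then nf else nt) = min nt nf := by
    split_ifs <;> omega
  rw [ht]
  by_cases hd : e - s + 1 < min nt nf
  · simp only [hd, if_true]
    rw [loop_eq nf (min nt nf) _ s e false hd (by omega) (by
      rw [Int.toNat_of_nonneg (by omega)])]
    exact (alt_eq_closedF nf nt s e (by omega)).symm
  · simp only [hd, if_false]
    unfold expand_segment_alt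
    simp only [not_lt] at hd
    rw [if_pos (by omega)]
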